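-- pv_equiv track=rewrite | github.com/moiralala/Find_my_Dorm | Find_my_Dorm/Apartments/jsj.py | process_address
-- ===== SOURCE A (Python) =====
-- def process_address(address):
--     """
--     Process the address string to modify its format.
--
--     >>> jsj = JSJ('https://jsjmanagement.com/on-campus/listing/', 'JSJ')
--     >>> jsj.process_address("123 Main Street")
--     '123 Main St'
--     >>> jsj.process_address("456 Elm Avenue")
--     '456 Elm Ave'
--     >>> jsj.process_address("789 Oak Street-1")
--     '789 Oak St'
--     >>> jsj.process_address("101 Pine Street Apartment 5")
--     '101 Pine St'
--     >>> jsj.process_address("202 Birch Road")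
--     '202 Birch Road'
--     """
--     address_parts = address.split()
--     processed_parts = []
--
--     # Iterate over address parts to process each word
--     for part in address_parts:
--         if part in ['Street', 'St', 'Street-1']:
--             processed_parts.append('St')
--             break
--         elif part in ['Avenue', 'Ave']:
--             processed_parts.append('Ave')
--             break
--         else:
--             processed_parts.append(part)
--
--     return ' '.join(processed_parts)
-- ===== SOURCE B (Python) =====
-- def process_address(address):
--     parts = address.split()
--     # keyword-driven search: for each suffix keyword, locate its first
--     # occurrence; keep the overall earliest hit and its abbreviation
--     best = None
--     for abbr, keys in (('St', ('Street', 'St', 'Street-1')),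
--                        ('Ave', ('Avenue', 'Ave'))):
--         for key in keys:
--             if key in parts:
--                 j = parts.index(key)
--                 if best is None or j < best[0]:
--                     best = (j, abbr)
--     if best is None:
--         return ' '.join(parts)
--     return ' '.join(parts[:best[0]] + [best[1]])
-- ===== Notes on version B (the rewrite author's own statement) =====
-- stated objective: alternative
-- what changed: Inverts the traversal: instead of scanning tokens left-to-right and stopping at the first suffix word, B searches the token list once per suffix keyword (list.index), keeps the minimal hit position, and rebuilds the answer by slicing before it; correctness rests on the fact that the minimum of the per-keyword first-occurrence indices is exactly the index of the first token that is any keyword.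
import Mathlib
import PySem

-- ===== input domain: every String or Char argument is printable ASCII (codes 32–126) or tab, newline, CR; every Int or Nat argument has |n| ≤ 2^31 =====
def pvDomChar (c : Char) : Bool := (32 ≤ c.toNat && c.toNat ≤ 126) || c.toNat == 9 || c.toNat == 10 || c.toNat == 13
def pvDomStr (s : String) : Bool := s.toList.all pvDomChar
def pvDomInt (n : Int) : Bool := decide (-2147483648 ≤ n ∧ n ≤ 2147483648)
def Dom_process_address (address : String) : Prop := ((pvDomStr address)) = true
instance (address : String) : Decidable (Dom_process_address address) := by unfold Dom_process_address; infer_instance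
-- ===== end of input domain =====

-- B inverts the traversal: instead of scanning tokens and stopping at the first suffix word,
-- it finds each keyword's first occurrence with list.index and keeps the minimal position.

-- ===== PORT A =====
-- the for-loop with break, carrying the accumulator processed_parts
def paLoop : List String → List String → List String
  | [], acc => acc
  | p :: rest, acc =>
    if p = "Street" ∨ p = "St" ∨ p = "Street-1" then acc ++ ["St"]
    else if p = "Avenue" ∨ p = "Ave" then acc ++ ["Ave"]
    else paLoop rest (acc ++ [p])

def process_address (address : String) : String :=
  PySem.Str.join " " (paLoop (PySem.Str.split₀ address) [])

-- ===== PORT B =====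
-- one iteration of B's inner loop: 'if key in parts: j = parts.index(key); update best'
def pbStep (parts : List String) (best : Option (Nat × String)) (abbr key : String) :
    Option (Nat × String) :=
  match PySem.List.index? parts key with
  | none => best
  | some j =>
    match best with
    | none => some (j, abbr)
    | some (j0, a0) => if j < j0 then some (j, abbr) else some (j0, a0)

-- the literal keyword table of Source B
def pbTable : List (String × List String) :=
  [("St", ["Street", "St", "Street-1"]), ("Ave", ["Avenue", "Ave"])]

-- the two nested for-loops computing best
def pbBest (parts : List String) : Option (Nat × String) :=
  pbTable.foldl (fun best ak => ak.2.foldl (fun b k => pbStep parts b ak.1 k) best) none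

def process_address_alt (address : String) : String :=
  let parts := PySem.Str.split₀ address
  match pbBest parts with
  | none => PySem.Str.join " " parts
  | some (j, abbr) => PySem.Str.join " " (parts.take j ++ [abbr])

-- ===== PRECONDITION & SPEC =====
def Spec_process_address (address : String) (out : String) : Prop := out = process_address_alt address
instance (address : String) (out : String) : Decidable (Spec_process_address address out) := by unfold Spec_process_address; infer_instance

-- ===== CLAIM (what is proved, stated in full; the proofs are below) =====
def Claim_equal_process_address : Prop := ∀ (address : String), Dom_process_address address → Spec_process_address address (process_address address)

-- ===== LEMMAS AND PROOFS =====

-- A's loop body as a direct structural recursion (accumulator removed)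
def paBody : List String → List String
  | [] => []
  | p :: rest =>
    if p = "Street" ∨ p = "St" ∨ p = "Street-1" then ["St"]
    else if p = "Avenue" ∨ p = "Ave" then ["Ave"]
    else p :: paBody rest

lemma paLoop_eq_paBody (parts acc : List String) :
    paLoop parts acc = acc ++ paBody parts := by
  induction parts generalizing acc with
  | nil => simp [paLoop, paBody]
  | cons p rest ih =>
    by_cases h1 : p = "Street" ∨ p = "St" ∨ p = "Street-1"
    · simp [paLoop, paBody, h1]
    · by_cases h2 : p = "Avenue" ∨ p = "Ave"
      · simp [paLoop, paBody, h1, h2]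
      · simp [paLoop, paBody, h1, h2, ih]

lemma pbBest_unfold (parts : List String) :
    pbBest parts = pbStep parts (pbStep parts (pbStep parts (pbStep parts
      (pbStep parts none "St" "Street") "St" "St") "St" "Street-1") "Ave" "Avenue") "Ave" "Ave" := by
  simp [pbBest, pbTable, List.foldl]

def pbShift (x : Nat × String) : Nat × String := (x.1 + 1, x.2)

lemma pbStep_shift (rest : List String) (p key abbr : String) (hk : key ≠ p)
    (b : Option (Nat × String)) :
    pbStep (p :: rest) (b.map pbShift) abbr key = (pbStep rest b abbr key).map pbShift := by
  rw [pbStep, pbStep, PySem.List.index?_cons_of_ne rest (fun h => hk h.symm)]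
  cases hi : PySem.List.index? rest key with
  | none => simp
  | some j =>
    cases b with
    | none => simp [pbShift]
    | some x =>
      obtain ⟨j0, a0⟩ := x
      by_cases hlt : j < j0 <;> simp [pbShift, hlt]

-- best never moves past an already-found position 0
lemma pbStep_zero (parts : List String) (abbr key a : String) :
    pbStep parts (some (0, a)) abbr key = some (0, a) := by
  rw [pbStep]
  cases hi : PySem.List.index? parts key <;> simp

-- if key occurs at the head and best so far is none or positive, best becomes (0, abbr)
lemma pbStep_hit (rest : List String) (p abbr : String)
    (b : Option (Nat × String)) (hb : ∀ j0 a0, b = some (j0, a0) → 0 < j0) :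
    pbStep (p :: rest) b abbr p = some (0, abbr) := by
  rw [pbStep, PySem.List.index?_cons_self]
  cases b with
  | none => simp
  | some x => obtain ⟨j0, a0⟩ := x; simp [hb j0 a0 rfl]

-- a step on a non-head key keeps best none-or-positive
lemma pbStep_pos (rest : List String) (p abbr key : String) (hk : key ≠ p)
    (b : Option (Nat × String)) (hb : ∀ j0 a0, b = some (j0, a0) → 0 < j0) :
    ∀ j0 a0, pbStep (p :: rest) b abbr key = some (j0, a0) → 0 < j0 := by
  intro j0 a0 h
  rw [pbStep, PySem.List.index?_cons_of_ne rest (fun h => hk h.symm)] at h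
  cases hi : PySem.List.index? rest key with
  | none => rw [hi] at h; simp at h; exact hb _ _ h
  | some j =>
    rw [hi] at h; simp at h
    cases b with
    | none => simp at h; omega
    | some x =>
      obtain ⟨j1, a1⟩ := x
      by_cases hlt : j + 1 < j1 <;> simp [hlt] at h
      · omega
      · have := hb j1 a1 rfl; omega

lemma pbBest_cons_none (rest : List String) (p : String)
    (h1 : p ≠ "Street") (h2 : p ≠ "St") (h3 : p ≠ "Street-1")
    (h4 : p ≠ "Avenue") (h5 : p ≠ "Ave") :
    pbBest (p :: rest) = (pbBest rest).map pbShift := by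
  rw [pbBest_unfold]
  have h0 : (none : Option (Nat × String)) = Option.map pbShift none := rfl
  rw [h0, pbStep_shift rest p _ _ (fun h => h1 h.symm),
      pbStep_shift rest p _ _ (fun h => h2 h.symm),
      pbStep_shift rest p _ _ (fun h => h3 h.symm),
      pbStep_shift rest p _ _ (fun h => h4 h.symm),
      pbStep_shift rest p _ _ (fun h => h5 h.symm)]
  rfl

-- the take-and-abbreviate body of B as a function of the word list
def pbBody (parts : List String) : List String :=
  match pbBest parts with
  | none => parts
  | some (j, abbr) => parts.take j ++ [abbr]

lemma paBody_eq_pbBody (parts : List String) : paBody parts = pbBody parts := by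
  induction parts with
  | nil => rfl
  | cons p rest ih =>
    by_cases hs1 : p = "Street"
    · subst hs1
      have : pbBest ("Street" :: rest) = some (0, "St") := by
        rw [pbBest_unfold]
        rw [pbStep_hit rest _ "St" none (by simp), pbStep_zero, pbStep_zero, pbStep_zero,
          pbStep_zero]
      simp [paBody, pbBody, this]
    · by_cases hs2 : p = "St"
      · subst hs2
        have : pbBest ("St" :: rest) = some (0, "St") := by
          rw [pbBest_unfold]
          rw [pbStep_hit rest _ "St"
            (pbStep ("St" :: rest) none "St" "Street")
            (pbStep_pos rest _ _ _ (by decide) none (by simp)),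
            pbStep_zero, pbStep_zero, pbStep_zero]
        simp [paBody, pbBody, this]
      · by_cases hs3 : p = "Street-1"
        · subst hs3
          have : pbBest ("Street-1" :: rest) = some (0, "St") := by
            rw [pbBest_unfold]
            rw [pbStep_hit rest _ "St" _
              (pbStep_pos rest _ _ _ (by decide) _
                (pbStep_pos rest _ _ _ (by decide) none (by simp))),
              pbStep_zero, pbStep_zero]
          simp [paBody, pbBody, this]
        · by_cases hs4 : p = "Avenue"
          · subst hs4
            have : pbBest ("Avenue" :: rest) = some (0, "Ave") := by
              rw [pbBest_unfold]
              rw [pbStep_hit rest _ "Ave" _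
                (pbStep_pos rest _ _ _ (by decide) _
                  (pbStep_pos rest _ _ _ (by decide) _
                    (pbStep_pos rest _ _ _ (by decide) none (by simp)))),
                pbStep_zero]
            simp [paBody, pbBody, this]
          · by_cases hs5 : p = "Ave"
            · subst hs5
              have : pbBest ("Ave" :: rest) = some (0, "Ave") := by
                rw [pbBest_unfold]
                exact pbStep_hit rest _ "Ave" _
                  (pbStep_pos rest _ _ _ (by decide) _
                    (pbStep_pos rest _ _ _ (by decide) _
                      (pbStep_pos rest _ _ _ (by decide) _
                        (pbStep_pos rest _ _ _ (by decide) none (by simp)))))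
              simp [paBody, pbBody, this]
            · have hb := pbBest_cons_none rest p hs1 hs2 hs3 hs4 hs5
              have h1 : ¬(p = "Street" ∨ p = "St" ∨ p = "Street-1") := by tauto
              have h2 : ¬(p = "Avenue" ∨ p = "Ave") := by tauto
              rw [paBody]
              simp only [h1, h2, if_false]
              rw [ih, pbBody, pbBody, hb]
              cases hbr : pbBest rest with
              | none => simp
              | some x => obtain ⟨j, a⟩ := x; simp [pbShift]

-- ===== VERDICT (by name: the statement is the Claim_ definition above) =====
theorem process_address_spec : Claim_equal_process_address := by
  intro address _
  unfold Spec_process_address process_address process_address_alt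
  rw [paLoop_eq_paBody, List.nil_append, paBody_eq_pbBody]
  cases h : pbBest (PySem.Str.split₀ address) with
  | none => simp [pbBody, h]
  | some x => obtain ⟨j, a⟩ := x; simp [pbBody, h]
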